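-- pv_equiv track=rewrite | github.com/AblazaAlexander8/ablaza-ifc-v1 | scripts/generate_aifc_pack.py | pad_grid
-- ===== SOURCE A (Python) =====
-- from typing import List, Tuple
--
-- def pad_grid(start_weekday_idx: int, days_in_month: int) -> Tuple[List[str], int]:
--     """Render a month grid with correct weekday alignment (Sun‑first header)."""
--     header = "Sun Mon Tue Wed Thu Fri Sat"
--     lines = [header]
--     sun_first_idx = (start_weekday_idx + 1) % 7  # 0=Sun ... 6=Sat
--
--     row = ["   "] * sun_first_idx
--     day = 1
--     while len(row) < 7 and day <= days_in_month:
--         row.append(f"{day:>3}"); day += 1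
--     row += ["   "] * (7 - len(row))
--     lines.append(" ".join(row))
--
--     while day <= days_in_month:
--         row = []
--         for _ in range(7):
--             row.append(f"{day:>3}" if day <= days_in_month else "   ")
--             day += 1
--         lines.append(" ".join(row))
--
--     next_idx = (start_weekday_idx + days_in_month) % 7
--     return lines, next_idx
-- ===== SOURCE B (Python) =====
-- from typing import List, Tuple
--
-- def pad_grid(start_weekday_idx: int, days_in_month: int) -> Tuple[List[str], int]:
--     """Render a month grid with correct weekday alignment (Sun-first header)."""
--     header = "Sun Mon Tue Wed Thu Fri Sat"
--     sun_first_idx = (start_weekday_idx + 1) % 7  # 0=Sun ... 6=Sat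
--     cells = ["   "] * sun_first_idx + [f"{d:>3}" for d in range(1, days_in_month + 1)]
--     total = max(7, -(-len(cells) // 7) * 7)  # pad to a multiple of 7, at least one row
--     cells += ["   "] * (total - len(cells))
--     lines = [header] + [" ".join(cells[i:i + 7]) for i in range(0, total, 7)]
--     next_idx = (start_weekday_idx + days_in_month) % 7
--     return lines, next_idx
-- ===== Notes on version B (the rewrite author's own statement) =====
-- stated objective: simpler
-- what changed: B builds one flat list of cell strings, pads it to a multiple of 7 (at least one full row) and slices it into rows of 7, replacing A's three imperative while/for loops with day/row counters by a pad-then-chunk pipeline.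
import Mathlib
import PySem

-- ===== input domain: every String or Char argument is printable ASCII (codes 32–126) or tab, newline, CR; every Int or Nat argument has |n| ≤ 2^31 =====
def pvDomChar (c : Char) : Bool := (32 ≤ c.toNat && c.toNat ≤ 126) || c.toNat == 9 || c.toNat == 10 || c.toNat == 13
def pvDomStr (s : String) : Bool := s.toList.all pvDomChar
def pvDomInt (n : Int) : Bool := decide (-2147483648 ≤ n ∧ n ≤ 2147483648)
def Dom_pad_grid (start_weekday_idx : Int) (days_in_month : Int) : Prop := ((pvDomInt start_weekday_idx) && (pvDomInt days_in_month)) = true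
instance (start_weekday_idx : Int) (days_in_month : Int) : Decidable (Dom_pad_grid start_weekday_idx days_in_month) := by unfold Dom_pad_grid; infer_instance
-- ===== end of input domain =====

-- B replaces A's three imperative loops by a flat cell list padded to a multiple of 7 and
-- chunked into rows of 7 (same return value; objective: simpler decomposition).

-- shared helper: f"{d:>3}" — str(d) right-aligned in width 3, space fill (exact for every int)
def fmt3 (d : Int) : String :=
  let cs := PySem.Int.toChars d
  String.ofList (List.replicate (3 - cs.length) ' ' ++ cs)

-- ===== PORT A =====
-- first while loop: while len(row) < 7 and day <= days: row.append(f"{day:>3}"); day += 1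
-- (fuel 7 suffices: the guard fails once len(row) reaches 7)
def padA_loop1 : Nat → List String → Int → Int → List String × Int
  | 0, row, day, _ => (row, day)
  | n+1, row, day, days =>
    if row.length < 7 ∧ day ≤ days then padA_loop1 n (row ++ [fmt3 day]) (day+1) days
    else (row, day)

-- inner for _ in range(7): row.append(f"{day:>3}" if day <= days else "   "); day += 1
def padA_inner : Nat → List String → Int → Int → List String × Int
  | 0, row, day, _ => (row, day)
  | n+1, row, day, days =>
    padA_inner n (row ++ [if day ≤ days then fmt3 day else "   "]) (day+1) days

theorem padA_inner_snd (n : Nat) : ∀ (row : List String) (day days : Int),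
    (padA_inner n row day days).2 = day + n := by
  induction n with
  | zero => intro row day days; simp [padA_inner]
  | succ k ih =>
    intro row day days
    rw [padA_inner, ih]
    push_cast
    ring

-- outer while day <= days loop
def padA_loop2 (lines : List String) (day days : Int) : List String × Int :=
  if h : day ≤ days then
    let r := padA_inner 7 [] day days
    padA_loop2 (lines ++ [PySem.Str.join " " r.1]) r.2 days
  else (lines, day)
termination_by (days + 1 - day).toNat
decreasing_by
  have h7 := padA_inner_snd 7 ([] : List String) day days
  omega

def pad_grid (start_weekday_idx : Int) (days_in_month : Int) : List String × Int :=
  let header := "Sun Mon Tue Wed Thu Fri Sat"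
  let sun_first_idx := (PySem.Int.mod (start_weekday_idx + 1) 7).toNat
  let row := List.replicate sun_first_idx "   "
  let r1 := padA_loop1 7 row 1 days_in_month
  let row1 := r1.1 ++ List.replicate (7 - r1.1.length) "   "
  let lines := [header, PySem.Str.join " " row1]
  let r2 := padA_loop2 lines r1.2 days_in_month
  (r2.1, PySem.Int.mod (start_weekday_idx + days_in_month) 7)

-- ===== PORT B =====
-- the slicing comprehension [" ".join(cells[i:i+7]) for i in range(0, total, 7)]
def padB_chunks : List String → List String
  | [] => []
  | x :: xs => PySem.Str.join " " ((x :: xs).take 7) :: padB_chunks ((x :: xs).drop 7)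
termination_by l => l.length
decreasing_by simp

def pad_grid_alt (start_weekday_idx : Int) (days_in_month : Int) : List String × Int :=
  let header := "Sun Mon Tue Wed Thu Fri Sat"
  let sun_first_idx := (PySem.Int.mod (start_weekday_idx + 1) 7).toNat
  let cells := List.replicate sun_first_idx "   "
      ++ (PySem.List.pyRange 1 (days_in_month + 1) 1).map fmt3
  -- total = max(7, -(-len(cells) // 7) * 7)
  let total := max 7 ((-(PySem.Int.floordiv (-(cells.length : Int)) 7) * 7).toNat
    )
  let padded := cells ++ List.replicate (total - cells.length) "   "
  (header :: padB_chunks padded, PySem.Int.mod (start_weekday_idx + days_in_month) 7)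

-- ===== PRECONDITION & SPEC =====
def Spec_pad_grid (start_weekday_idx : Int) (days_in_month : Int) (out : List String × Int) : Prop := out = pad_grid_alt start_weekday_idx days_in_month
instance (start_weekday_idx : Int) (days_in_month : Int) (out : List String × Int) : Decidable (Spec_pad_grid start_weekday_idx days_in_month out) := by unfold Spec_pad_grid; infer_instance

-- ===== CLAIM (what is proved, stated in full; the proofs are below) =====
def Claim_equal_pad_grid : Prop := ∀ (start_weekday_idx : Int) (days_in_month : Int), Dom_pad_grid start_weekday_idx days_in_month → Spec_pad_grid start_weekday_idx days_in_month (pad_grid start_weekday_idx days_in_month)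

-- ===== LEMMAS AND PROOFS =====

-- the k day cells starting at day d0
def mapCells (d0 : Int) : Nat → List String
  | 0 => []
  | k + 1 => fmt3 d0 :: mapCells (d0 + 1) k

-- one row's worth of n cells starting at day d0 (day cells, blanks past the month's end)
def chunkCells (days d0 : Int) : Nat → List String
  | 0 => []
  | n + 1 => (if d0 ≤ days then fmt3 d0 else "   ") :: chunkCells days (d0 + 1) n

-- the data rows emitted by A's second while loop, starting at day d0
def rowsFrom (days d0 : Int) : List String :=
  if h : d0 ≤ days then
    PySem.Str.join " " (chunkCells days d0 7) :: rowsFrom days (d0 + 7)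
  else []
termination_by (days + 1 - d0).toNat
decreasing_by omega

theorem mapCells_length (k : Nat) : ∀ (d0 : Int), (mapCells d0 k).length = k := by
  induction k with
  | zero => intro d0; rfl
  | succ n ih => intro d0; simp [mapCells, ih]

theorem mapCells_add (a : Nat) : ∀ (b : Nat) (d0 : Int),
    mapCells d0 (a + b) = mapCells d0 a ++ mapCells (d0 + a) b := by
  induction a with
  | zero => intro b d0; simp [mapCells]
  | succ n ih =>
    intro b d0
    rw [show n + 1 + b = (n + b) + 1 from by omega]
    simp only [mapCells, ih b (d0 + 1), List.cons_append]
    rw [show d0 + 1 + (n : Int) = d0 + (n + 1 : Nat) from by push_cast; ring]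

theorem mapCells_eq_map_pyRange (k : Nat) : ∀ (d0 b : Int), k = (b - d0).toNat →
    (PySem.List.pyRange d0 b 1).map fmt3 = mapCells d0 k := by
  induction k with
  | zero =>
    intro d0 b h
    rw [PySem.List.pyRange_one_eq_nil (by omega)]; rfl
  | succ n ih =>
    intro d0 b h
    rw [PySem.List.pyRange_one_cons (by omega)]
    simp only [List.map_cons, mapCells]
    rw [ih (d0 + 1) b (by omega)]

theorem chunkCells_eq_mapCells (n : Nat) : ∀ (days d0 : Int), d0 + n ≤ days + 1 →
    chunkCells days d0 n = mapCells d0 n := by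
  induction n with
  | zero => intro days d0 _; rfl
  | succ m ih =>
    intro days d0 h
    simp only [chunkCells, mapCells, if_pos (show d0 ≤ days by omega)]
    rw [ih days (d0 + 1) (by omega)]

theorem chunkCells_blank (n : Nat) : ∀ (days d0 : Int), days < d0 →
    chunkCells days d0 n = List.replicate n "   " := by
  induction n with
  | zero => intro days d0 _; rfl
  | succ m ih =>
    intro days d0 h
    simp only [chunkCells, if_neg (show ¬ d0 ≤ days by omega), List.replicate_succ]
    rw [ih days (d0 + 1) (by omega)]

-- a short last row: k day cells then blanks
theorem chunkCells_eq_short (k : Nat) : ∀ (n : Nat) (days d0 : Int), k ≤ n →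
    d0 + k = days + 1 →
    chunkCells days d0 n = mapCells d0 k ++ List.replicate (n - k) "   " := by
  induction k with
  | zero =>
    intro n days d0 _ hd
    simp only [mapCells, List.nil_append, Nat.sub_zero]
    exact chunkCells_blank n days d0 (by omega)
  | succ m ih =>
    intro n days d0 hk hd
    obtain ⟨n', rfl⟩ : ∃ n', n = n' + 1 := ⟨n - 1, by omega⟩
    simp only [chunkCells, mapCells, if_pos (show d0 ≤ days by omega), List.cons_append,
      Nat.succ_sub_succ]
    rw [ih n' days (d0 + 1) (by omega) (by omega)]

-- characterisation of A's first loop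
theorem padA_loop1_spec : ∀ (fuel : Nat) (row : List String) (day days : Int) (m : Nat),
    7 ≤ row.length + fuel → m = min (7 - row.length) (days + 1 - day).toNat →
    padA_loop1 fuel row day days = (row ++ mapCells day m, day + m) := by
  intro fuel
  induction fuel with
  | zero =>
    intro row day days m h hm
    have : m = 0 := by omega
    simp [padA_loop1, this, mapCells]
  | succ f ih =>
    intro row day days m h hm
    by_cases hg : row.length < 7 ∧ day ≤ days
    · have hK : 1 ≤ (days + 1 - day).toNat := by omega
      have hm1 : 1 ≤ m := by omega
      rw [padA_loop1, if_pos hg]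
      rw [ih (row ++ [fmt3 day]) (day + 1) days (m - 1) (by simp; omega)
        (by simp; omega)]
      simp only [Prod.mk.injEq]
      refine ⟨?_, ?_⟩
      · conv_rhs => rw [show m = m - 1 + 1 from by omega]
        rw [mapCells]
        simp
      · push_cast; omega
    · have hm0 : m = 0 := by
        rcases not_and_or.mp hg with h1 | h2
        · omega
        · have : (days + 1 - day).toNat = 0 := by omega
          omega
      rw [padA_loop1, if_neg hg]
      simp [hm0, mapCells]

-- characterisation of A's inner for loop
theorem padA_inner_spec : ∀ (n : Nat) (row : List String) (day days : Int),
    padA_inner n row day days = (row ++ chunkCells days day n, day + n) := by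
  intro n
  induction n with
  | zero => intro row day days; simp [padA_inner, chunkCells]
  | succ k ih =>
    intro row day days
    rw [padA_inner, ih]
    simp only [Prod.mk.injEq]
    refine ⟨?_, ?_⟩
    · rw [chunkCells]
      simp
    · push_cast; ring

-- characterisation of A's second while loop (lines component)
theorem padA_loop2_fst (days : Int) : ∀ (fuel : Nat) (d0 : Int) (lines : List String),
    (days + 1 - d0).toNat ≤ fuel →
    (padA_loop2 lines d0 days).1 = lines ++ rowsFrom days d0 := by
  intro fuel
  induction fuel with
  | zero =>
    intro d0 lines h
    have hd : ¬ d0 ≤ days := by omega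
    rw [padA_loop2, dif_neg hd, rowsFrom, dif_neg hd]
    simp
  | succ f ih =>
    intro d0 lines h
    by_cases hd : d0 ≤ days
    · rw [padA_loop2, dif_pos hd, rowsFrom, dif_pos hd]
      simp only [padA_inner_spec 7 [] d0 days, List.nil_append]
      norm_num
      rw [ih (d0 + 7) _ (by omega)]
      simp
    · rw [padA_loop2, dif_neg hd, rowsFrom, dif_neg hd]
      simp

-- padB_chunks peels one full row off the front
theorem padB_chunks_append7 (l1 rest : List String) (h : l1.length = 7) :
    padB_chunks (l1 ++ rest) = PySem.Str.join " " l1 :: padB_chunks rest := by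
  cases l1 with
  | nil => simp at h
  | cons x xs =>
    simp only [List.length_cons] at h
    rw [List.cons_append, padB_chunks.eq_2]
    rw [← List.cons_append]
    rw [List.take_append_of_le_length (by simp; omega),
        List.drop_append_of_le_length (by simp; omega)]
    rw [List.take_of_length_le (by simp; omega), List.drop_eq_nil_of_le (by simp; omega)]
    simp

theorem padB_chunks_len7 (l : List String) (h : l.length = 7) :
    padB_chunks l = [PySem.Str.join " " l] := by
  have h2 := padB_chunks_append7 l [] h
  rw [List.append_nil] at h2
  rw [h2, padB_chunks.eq_1]

-- B's chunking of the remaining day cells plus trailing pad equals A's remaining rows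
theorem padB_chunks_spec (days : Int) : ∀ (fuel k pad : Nat) (d0 : Int),
    k ≤ fuel → (k : Int) = days + 1 - d0 → (k + pad) % 7 = 0 → pad < 7 →
    padB_chunks (mapCells d0 k ++ List.replicate pad "   ") = rowsFrom days d0 := by
  intro fuel
  induction fuel with
  | zero =>
    intro k pad d0 hk hkd hmod hpad
    have hk0 : k = 0 := by omega
    have hp0 : pad = 0 := by omega
    subst hk0; subst hp0
    rw [rowsFrom, dif_neg (by omega)]
    simp [mapCells, padB_chunks.eq_1]
  | succ f ih =>
    intro k pad d0 hk hkd hmod hpad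
    by_cases h7 : 7 ≤ k
    · -- full row then recurse
      have hsplit : k = 7 + (k - 7) := by omega
      rw [hsplit, mapCells_add, List.append_assoc]
      rw [padB_chunks_append7 _ _ (mapCells_length 7 d0)]
      push_cast
      rw [ih (k - 7) pad (d0 + 7) (by omega) (by push_cast; omega) (by omega) hpad]
      conv_rhs => rw [rowsFrom]
      rw [dif_pos (by omega)]
      rw [chunkCells_eq_mapCells 7 days d0 (by push_cast; omega)]
    · by_cases hk0 : k = 0
      · have hp0 : pad = 0 := by omega
        subst hk0; subst hp0
        rw [rowsFrom, dif_neg (by omega)]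
        simp [mapCells, padB_chunks.eq_1]
      · -- 0 < k < 7 : exactly one (last) row
        have hpk : k + pad = 7 := by omega
        have hlen : (mapCells d0 k ++ List.replicate pad ("   " : String)).length = 7 := by
          simp [mapCells_length]; omega
        rw [padB_chunks_len7 _ hlen]
        rw [rowsFrom, dif_pos (by omega)]
        rw [rowsFrom, dif_neg (by omega)]
        rw [chunkCells_eq_short k 7 days d0 (by omega) (by omega)]
        rw [show 7 - k = pad from by omega]

-- ceiling division: -(-L // 7) = (L + 6) / 7 for a natural L
theorem ceil7_eq (L : Nat) :
    -(PySem.Int.floordiv (-(L : Int)) 7) = (((L + 6) / 7 : Nat) : Int) := by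
  rw [PySem.Int.neg_floordiv_neg_eq_iff_of_pos (by norm_num)]
  constructor <;> push_cast <;> omega

theorem main_eq (s d : Int) : pad_grid s d = pad_grid_alt s d := by
  have hsun_lt : PySem.Int.mod (s + 1) 7 < 7 := PySem.Int.mod_lt _ (by norm_num)
  have hsun_nonneg : 0 ≤ PySem.Int.mod (s + 1) 7 := PySem.Int.mod_nonneg _ (by norm_num)
  unfold pad_grid pad_grid_alt
  simp only []
  set sun : Nat := (PySem.Int.mod (s + 1) 7).toNat with hsun
  set k0 : Nat := d.toNat with hk0
  have hsun7 : sun < 7 := by omega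
  rw [mapCells_eq_map_pyRange k0 1 (d + 1) (by omega)]
  rw [padA_loop1_spec 7 (List.replicate sun "   ") 1 d (min (7 - sun) k0)
    (by simp only [List.length_replicate]; omega)
    (by simp only [List.length_replicate]; omega)]
  set m : Nat := min (7 - sun) k0 with hmdef
  simp only []
  have hlen : (List.replicate sun ("   " : String) ++ mapCells 1 k0).length = sun + k0 := by
    simp [mapCells_length]
  have hlen1 : (List.replicate sun ("   " : String) ++ mapCells 1 m).length = sun + m := by
    simp [mapCells_length]
  rw [hlen, hlen1, ceil7_eq (sun + k0)]
  set C : Nat := (sun + k0 + 6) / 7 with hC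
  rw [show (((C : Int)) * 7).toNat = C * 7 from by omega]
  congr 1
  by_cases hcase : sun + k0 ≤ 7
  · -- everything fits in the first (only) row
    have hm_eq : m = k0 := by omega
    rw [show max 7 (C * 7) = 7 from by omega]
    rw [padA_loop2_fst d ((d + 1 - (1 + (m : Int))).toNat) _ _ (le_refl _)]
    rw [rowsFrom, dif_neg (by omega)]
    rw [padB_chunks_len7 _ (by simp [mapCells_length]; omega)]
    rw [hm_eq]
    simp
  · -- first row is full; remaining day cells are chunked into further rows
    have hm_eq : m = 7 - sun := by omega
    have hC2 : 2 ≤ C := by omega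
    rw [show max 7 (C * 7) = C * 7 from by omega]
    rw [padA_loop2_fst d ((d + 1 - (1 + (m : Int))).toNat) _ _ (le_refl _)]
    rw [show mapCells 1 k0 = mapCells 1 m ++ mapCells (1 + (m : Int)) (k0 - m) from by
      rw [← mapCells_add, show m + (k0 - m) = k0 from by omega]]
    rw [← List.append_assoc,
        List.append_assoc (List.replicate sun "   " ++ mapCells 1 m)]
    rw [padB_chunks_append7 _ _ (by simp [mapCells_length]; omega)]
    rw [padB_chunks_spec d (k0 - m) (k0 - m) (C * 7 - (sun + k0)) (1 + (m : Int))
      (le_refl _) (by push_cast; omega) (by omega) (by omega)]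
    rw [show 7 - (sun + m) = 0 from by omega]
    simp [List.append_assoc]

-- ===== VERDICT (by name: the statement is the Claim_ definition above) =====
theorem pad_grid_spec : Claim_equal_pad_grid := by
  intro s d _
  show _ = _
  exact main_eq s d
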